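-- pv_equiv track=rewrite | github.com/olliemamuda/SEO-AI | python scripts and dataset/dataCollection.py | checkAgainstKeyWords
-- ===== SOURCE A (Python) =====
-- def checkAgainstKeyWords(arrToCheck):
--     keyWords = ['short', 'term', 'short-term', 'lets', 'let', 'lettings', 'holiday', 'corporate', 'rentals', 'rental',
--                 'bnb', 'bnbs', 'accommodation', 'medium-term', 'medium', 'serviced', 'property', 'properties']
--     noMatches = 0
--     for i in range(len(arrToCheck)):
--         for j in range(len(keyWords)):
--             if(arrToCheck[i] == keyWords[j]):
--                 noMatches += 1
--     return noMatches
-- ===== SOURCE B (Python) =====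
-- def checkAgainstKeyWords(arrToCheck):
--     keyWords = ['short', 'term', 'short-term', 'lets', 'let', 'lettings', 'holiday', 'corporate', 'rentals', 'rental',
--                 'bnb', 'bnbs', 'accommodation', 'medium-term', 'medium', 'serviced', 'property', 'properties']
--     counts = {}
--     for w in arrToCheck:
--         counts[w] = counts.get(w, 0) + 1
--     total = 0
--     for k in keyWords:
--         total += counts.get(k, 0)
--     return total
-- ===== Notes on version B (the rewrite author's own statement) =====
-- stated objective: faster
-- what changed: Builds a frequency table of the input in one pass, then sums the multiplicities of the 18 distinct keywords, instead of scanning the whole keyword list for every input element.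
import Mathlib
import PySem

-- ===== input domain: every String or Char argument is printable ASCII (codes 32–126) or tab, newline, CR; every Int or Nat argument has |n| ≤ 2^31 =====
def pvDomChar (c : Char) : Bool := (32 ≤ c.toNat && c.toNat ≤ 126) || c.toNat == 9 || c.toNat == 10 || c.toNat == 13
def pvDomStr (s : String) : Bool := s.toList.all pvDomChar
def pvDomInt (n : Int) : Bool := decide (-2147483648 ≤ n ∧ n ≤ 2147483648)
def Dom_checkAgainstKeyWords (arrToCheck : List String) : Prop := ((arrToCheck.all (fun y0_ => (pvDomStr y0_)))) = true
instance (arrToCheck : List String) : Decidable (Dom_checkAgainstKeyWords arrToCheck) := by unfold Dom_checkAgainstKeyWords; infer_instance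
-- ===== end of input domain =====

-- B replaces A's nested element×keyword scan by one counting pass over the input plus a
-- single lookup pass over the 18 keywords (objective: faster, constant-factor / O(n*k) → O(n+k)).

-- the fixed keyword list (same data in both programs)
def pvKeyWords : List String :=
  ["short", "term", "short-term", "lets", "let", "lettings", "holiday", "corporate", "rentals", "rental",
   "bnb", "bnbs", "accommodation", "medium-term", "medium", "serviced", "property", "properties"]

-- ===== PORT A =====
def checkAgainstKeyWords (arrToCheck : List String) : Int :=
  (PySem.List.pyRange 0 (PySem.List.len arrToCheck) 1).foldl (fun noMatches i =>
    (PySem.List.pyRange 0 (PySem.List.len pvKeyWords) 1).foldl (fun acc j =>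
      if PySem.List.pyGetD arrToCheck i "" == PySem.List.pyGetD pvKeyWords j "" then acc + 1 else acc)
      noMatches) 0

-- ===== PORT B =====
def checkAgainstKeyWords_alt (arrToCheck : List String) : Int :=
  let counts : PySem.Dict String Int :=
    arrToCheck.foldl (fun d w => d.insert w (d.getD w 0 + 1)) PySem.Dict.empty
  pvKeyWords.foldl (fun total k => total + counts.getD k 0) 0

-- ===== PRECONDITION & SPEC =====
def Spec_checkAgainstKeyWords (arrToCheck : List String) (out : Int) : Prop := out = checkAgainstKeyWords_alt arrToCheck
instance (arrToCheck : List String) (out : Int) : Decidable (Spec_checkAgainstKeyWords arrToCheck out) := by unfold Spec_checkAgainstKeyWords; infer_instance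

-- ===== CLAIM (what is proved, stated in full; the proofs are below) =====
def Claim_equal_checkAgainstKeyWords : Prop := ∀ (arrToCheck : List String), Dom_checkAgainstKeyWords arrToCheck → Spec_checkAgainstKeyWords arrToCheck (checkAgainstKeyWords arrToCheck)

-- ===== LEMMAS AND PROOFS =====

-- a foldl that only adds equals init plus the sum of the summands
theorem foldl_add_sum (l : List String) (f : String → Int) :
    ∀ init : Int, l.foldl (fun s k => s + f k) init = init + (l.map f).sum := by
  induction l with
  | nil => intro init; simp
  | cons x xs ih => intro init; simp only [List.foldl_cons, List.map_cons, List.sum_cons, ih]; ring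

-- A's inner keyword loop counts the occurrences of x in the keyword list
theorem inner_loop_count (x : String) (l : List String) :
    ∀ acc : Int, l.foldl (fun a k => if x == k then a + 1 else a) acc = acc + (l.count x : Int) := by
  induction l with
  | nil => intro acc; simp
  | cons k ks ih =>
    intro acc
    simp only [List.foldl_cons, List.count_cons, ih]
    by_cases h : x = k
    · simp [h]; push_cast; ring
    · have h1 : (x == k) = false := by simp [h]
      have h2 : (k == x) = false := by simp [Ne.symm h]
      simp [h1, h2]

theorem inner_pyRange (x : String) (acc : Int) :
    (PySem.List.pyRange 0 (PySem.List.len pvKeyWords) 1).foldl (fun acc j =>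
      if x == PySem.List.pyGetD pvKeyWords j "" then acc + 1 else acc) acc
    = acc + (pvKeyWords.count x : Int) := by
  exact (PySem.List.foldl_pyRange_zero_pyGetD pvKeyWords ""
    (fun a k => if x == k then a + 1 else a) acc).trans (inner_loop_count x pvKeyWords acc)

-- summing the indicator of x over a list gives x's multiplicity
theorem sum_indicator (x : String) (l : List String) :
    (l.map (fun k => if x = k then (1:Int) else 0)).sum = (l.count x : Int) := by
  induction l with
  | nil => simp
  | cons k ks ih =>
    simp only [List.map_cons, List.sum_cons, List.count_cons, ih]
    by_cases h : x = k
    · simp [h]; push_cast; ring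
    · have h2 : (k == x) = false := by simp [Ne.symm h]
      simp [h, h2]

-- the exchange of the two traversals
theorem exchange (kw : List String) (arr : List String) :
    (arr.map (fun x => (kw.count x : Int))).sum = (kw.map (fun k => (arr.count k : Int))).sum := by
  induction arr with
  | nil => simp
  | cons x xs ih =>
    have step : (kw.map (fun k => ((x :: xs).count k : Int))).sum
        = (kw.map (fun k => (xs.count k : Int))).sum + (kw.count x : Int) := by
      have hpt : (kw.map (fun k => ((x :: xs).count k : Int)))
          = kw.map (fun k => (xs.count k : Int) + if x = k then (1:Int) else 0) := by
        apply List.map_congr_left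
        intro k _
        by_cases h : k = x
        · simp [h, List.count_cons]
        · simp [List.count_cons, Ne.symm h]
      rw [hpt, List.sum_map_add, sum_indicator x kw]
    simp only [List.map_cons, List.sum_cons, ih, step]
    ring

theorem counts_getD (arr : List String) (k : String) :
    (arr.foldl (fun d w => d.insert w (d.getD w 0 + 1)) (PySem.Dict.empty : PySem.Dict String Int)).getD k 0
      = (arr.count k : Int) := by
  rw [PySem.Dict.getD_foldl_insert_add_one]
  simp [PySem.Dict.getD, PySem.Dict.empty, PySem.Dict.get?]

-- ===== VERDICT (by name: the statement is the Claim_ definition above) =====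
theorem checkAgainstKeyWords_spec : Claim_equal_checkAgainstKeyWords := by
  intro arr _
  unfold Spec_checkAgainstKeyWords
  have hA : checkAgainstKeyWords arr = (arr.map (fun x => (pvKeyWords.count x : Int))).sum := by
    unfold checkAgainstKeyWords
    rw [PySem.List.foldl_pyRange_zero_pyGetD arr ""
      (fun (noMatches : Int) (x : String) =>
        (PySem.List.pyRange 0 (PySem.List.len pvKeyWords) 1).foldl (fun acc j =>
          if x == PySem.List.pyGetD pvKeyWords j "" then acc + 1 else acc) noMatches) 0]
    have hfun : (fun (noMatches : Int) (x : String) =>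
        (PySem.List.pyRange 0 (PySem.List.len pvKeyWords) 1).foldl (fun acc j =>
          if x == PySem.List.pyGetD pvKeyWords j "" then acc + 1 else acc) noMatches)
        = fun (nm : Int) (x : String) => nm + (pvKeyWords.count x : Int) := by
      funext nm x; exact inner_pyRange x nm
    rw [hfun, foldl_add_sum arr (fun x => (pvKeyWords.count x : Int)) 0]
    ring
  have hB : checkAgainstKeyWords_alt arr = (pvKeyWords.map (fun k => (arr.count k : Int))).sum := by
    simp only [checkAgainstKeyWords_alt]
    rw [foldl_add_sum]
    simp only [counts_getD, zero_add]
  rw [hA, hB]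
  exact exchange pvKeyWords arr
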